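-- pv_equiv track=rewrite | github.com/dev-hang/Programmers-Algorithm | level3/move_110.py | move_110
-- ===== SOURCE A (Python) =====
-- def move_110(s):
--     answer = []
--
--     for num in s:
--         stack, cnt = [], 0
--         for i in range(len(num)):
--             if num[i] == '0':
--                 if len(stack) >= 2 and stack[-2] == '1' and stack[-1] == '1':
--                     stack.pop()
--                     stack.pop()
--                     cnt += 1
--                 else:
--                     stack.append(num[i])
--             else:
--                 stack.append(num[i])
--
--         stack = ''.join(stack[::-1])
--         idx = stack.find('0')
--
--         if idx != -1:
--             result = stack[:idx] + '011' * cnt + stack[idx:]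
--         else:
--             result = stack + '011' * cnt
--
--         answer.append(''.join(result[::-1]))
--
--     return answer
-- ===== SOURCE B (Python) =====
-- def move_110(s):
--     answer = []
--     for num in s:
--         # reduce to the unique "110"-free remainder by repeated bulk deletion
--         rem = num
--         while '110' in rem:
--             rem = rem.replace('110', '')
--         cnt = (len(num) - len(rem)) // 3
--         # every removed block goes right after the last '0' (rfind = -1 => front)
--         j = rem.rfind('0')
--         answer.append(rem[:j + 1] + '110' * cnt + rem[j + 1:])
--     return answer
-- ===== Notes on version B (the rewrite author's own statement) =====
-- stated objective: alternative
-- what changed: B has no per-character stack simulation: it reduces each string to its '110'-free normal form by repeatedly deleting all '110' occurrences with str.replace, derives the removal count arithmetically from the length difference, and reinserts the blocks after the last '0' found by rfind instead of A's reverse/find/reverse detour.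
import Mathlib
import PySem

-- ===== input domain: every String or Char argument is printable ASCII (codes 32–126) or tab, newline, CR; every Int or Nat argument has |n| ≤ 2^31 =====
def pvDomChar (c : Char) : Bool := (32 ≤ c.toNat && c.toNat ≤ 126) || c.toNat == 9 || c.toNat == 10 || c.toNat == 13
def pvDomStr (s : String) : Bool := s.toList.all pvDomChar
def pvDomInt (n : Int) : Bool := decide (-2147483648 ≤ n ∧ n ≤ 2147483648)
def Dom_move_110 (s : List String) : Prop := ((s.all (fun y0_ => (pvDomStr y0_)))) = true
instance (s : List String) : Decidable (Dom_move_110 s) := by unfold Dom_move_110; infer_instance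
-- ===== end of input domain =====

-- B drops A's per-character stack simulation: it reduces each string to its '110'-free normal
-- form by repeatedly deleting all '110' occurrences (str.replace to a fixed point), derives the
-- removal count from the length difference, and reinserts the blocks after the last '0' found
-- by rfind.  Objective: alternative (different algorithm, similar typical cost).

-- ===== PORT A =====
-- inner loop of A: for i in range(len(num)) reading num[i], i.e. the chars of num in order
def pvAStep (p : List Char × Nat) (c : Char) : List Char × Nat :=
  if c = '0' then
    if 2 ≤ p.1.length ∧ PySem.List.pyGet? p.1 (-2) = some '1' ∧ PySem.List.pyGet? p.1 (-1) = some '1' then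
      (p.1.dropLast.dropLast, p.2 + 1)  -- stack.pop(); stack.pop(); cnt += 1
    else (p.1 ++ [c], p.2)              -- stack.append(num[i])
  else (p.1 ++ [c], p.2)                -- stack.append(num[i])

-- body of A's outer loop, for one string num
def pvAOne (num : String) : String :=
  let st := num.toList.foldl pvAStep ([], 0)
  let stackR := st.1.reverse                              -- ''.join(stack[::-1])
  let idx := PySem.Chars.find stackR ['0']                -- stack.find('0')
  let rep := List.flatten (List.replicate st.2 ['0', '1', '1'])   -- '011' * cnt
  let result :=
    if idx ≠ -1 then
      PySem.List.slice stackR none (some idx) ++ rep ++ PySem.List.slice stackR (some idx) none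
    else stackR ++ rep
  String.ofList result.reverse                            -- ''.join(result[::-1])

def move_110 (s : List String) : List String :=
  s.foldl (fun answer num => answer ++ [pvAOne num]) []   -- answer.append(...)

-- ===== PORT B =====
-- pvRep1 characterises one pass of rem.replace('110', ''); it and the next three lemmas are
-- needed by pvRemLoop's termination proof, so they stay above the port.
def pvRep1 : List Char → List Char
  | [] => []
  | c :: t =>
    if ['1', '1', '0'].isPrefixOf (c :: t) then pvRep1 (t.drop 2) else c :: pvRep1 t
termination_by l => l.length
decreasing_by
  · simp only [List.length_cons, List.length_drop]; omega
  · simp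

theorem pvRep1_len : ∀ l : List Char, (pvRep1 l).length ≤ l.length := by
  intro l
  induction l using pvRep1.induct with
  | case1 => simp [pvRep1]
  | case2 c t h ih =>
      rw [pvRep1, if_pos h]
      simp only [List.length_drop] at ih
      simp only [List.length_cons]; omega
  | case3 c t _ ih =>
      rw [pvRep1, if_neg ‹¬_›]
      simp only [List.length_cons]; omega

theorem pvGo_eq : ∀ (fuel : Nat) (l acc : List Char), l.length ≤ fuel →
    PySem.Chars.replace.go ['1', '1', '0'] [] fuel l acc = acc.reverse ++ pvRep1 l := by
  intro fuel
  induction fuel with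
  | zero =>
      intro l acc h
      have hl : l = [] := List.eq_nil_of_length_eq_zero (Nat.le_zero.mp h)
      subst hl
      simp [PySem.Chars.replace.go, pvRep1]
  | succ n ih =>
      intro l acc h
      cases l with
      | nil =>
          rw [PySem.Chars.replace.go]
          simp [pvRep1]
          omega
      | cons c t =>
          rw [PySem.Chars.replace.go]
          by_cases hp : ['1', '1', '0'].isPrefixOf (c :: t) = true
          · rw [if_pos hp]
            obtain ⟨v, hv⟩ := List.isPrefixOf_iff_prefix.mp hp
            have ht : t.drop 2 = (c :: t).drop 3 := rfl
            have hlen : ((c :: t).drop 3).length ≤ n := by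
              simp only [List.length_drop] at *
              simp only [List.length_cons] at h ⊢; omega
            rw [show List.drop (['1', '1', '0'] : List Char).length (c :: t) = (c :: t).drop 3 from rfl]
            rw [ih _ _ hlen]
            rw [pvRep1, if_pos hp, ht]
            simp
          · rw [if_neg hp]
            rw [ih t (c :: acc) (by simp only [List.length_cons] at h; omega)]
            rw [pvRep1, if_neg hp]
            simp

theorem pvReplace_eq (l : List Char) :
    PySem.Chars.replace l ['1', '1', '0'] [] = pvRep1 l := by
  unfold PySem.Chars.replace
  rw [if_neg (by simp)]
  simpa using pvGo_eq l.length l [] le_rfl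

theorem pvRep1_len_infix : ∀ l : List Char, ['1', '1', '0'] <:+: l →
    (pvRep1 l).length + 3 ≤ l.length := by
  intro l
  induction l using pvRep1.induct with
  | case1 => intro h; simpa using h.length_le
  | case2 c t h ih =>
      intro _
      rw [pvRep1, if_pos h]
      have := pvRep1_len (t.drop 2)
      obtain ⟨v, hv⟩ := List.isPrefixOf_iff_prefix.mp h
      have hlen : 2 ≤ t.length := by
        have := congrArg List.length hv
        simp at this
        omega
      simp only [List.length_drop] at this
      simp only [List.length_cons]; omega
  | case3 c t h ih =>
      intro hinf
      rw [pvRep1, if_neg h]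
      rcases List.infix_cons_iff.mp hinf with hpre | hinf'
      · exact absurd (List.isPrefixOf_iff_prefix.mpr hpre) h
      · have := ih hinf'
        simp only [List.length_cons]; omega

-- while '110' in rem: rem = rem.replace('110', '')
def pvRemLoop (l : List Char) : List Char :=
  if PySem.Chars.isIn ['1', '1', '0'] l = true then
    pvRemLoop (PySem.Chars.replace l ['1', '1', '0'] [])
  else l
termination_by l.length
decreasing_by
  rw [pvReplace_eq]
  have := pvRep1_len_infix l ((PySem.Chars.isIn_iff_infix _ _).mp (by assumption))
  omega

-- body of B's outer loop, for one string num
def pvBOne (num : String) : String :=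
  let rem := pvRemLoop num.toList
  let cnt : Int := PySem.Int.floordiv ((num.toList.length : Int) - (rem.length : Int)) 3
  let j : Int := PySem.Chars.rfind rem ['0']              -- rem.rfind('0')
  String.ofList (PySem.List.slice rem none (some (j + 1)) ++
    List.flatten (List.replicate cnt.toNat ['1', '1', '0']) ++
    PySem.List.slice rem (some (j + 1)) none)

def move_110_alt (s : List String) : List String :=
  s.foldl (fun answer num => answer ++ [pvBOne num]) []   -- answer.append(...)

-- ===== PRECONDITION & SPEC =====
def Spec_move_110 (s : List String) (out : List String) : Prop := out = move_110_alt s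
instance (s : List String) (out : List String) : Decidable (Spec_move_110 s out) := by unfold Spec_move_110; infer_instance

-- ===== CLAIM (what is proved, stated in full; the proofs are below) =====
def Claim_equal_move_110 : Prop := ∀ (s : List String), Dom_move_110 s → Spec_move_110 s (move_110 s)

-- ===== LEMMAS AND PROOFS =====

-- the stack component of an A-step does not depend on the counter
theorem pvAStep_fst (st : List Char) (x y : Nat) (c : Char) :
    (pvAStep (st, x) c).1 = (pvAStep (st, y) c).1 := by
  simp only [pvAStep]; split_ifs <;> rfl

-- number of trailing '1's of A's stack
def pvTrail (st : List Char) : Nat := (st.reverse.takeWhile (· == '1')).length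

theorem pvCondA_iff (st : List Char) :
    (2 ≤ st.length ∧ PySem.List.pyGet? st (-2) = some '1' ∧ PySem.List.pyGet? st (-1) = some '1')
      ↔ 2 ≤ pvTrail st := by
  obtain ⟨r, rfl⟩ : ∃ r : List Char, st = r.reverse := ⟨st.reverse, (List.reverse_reverse st).symm⟩
  have htr : pvTrail r.reverse = (r.takeWhile (· == '1')).length := by
    simp [pvTrail]
  rw [htr]
  rcases r with _ | ⟨a, _ | ⟨b, t⟩⟩
  · simp [PySem.List.pyGet?]
  · constructor
    · rintro ⟨h2, -, -⟩; simp at h2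
    · intro h
      have hle := (List.takeWhile_prefix (l := [a]) (· == '1')).length_le
      simp at hle; omega
  · have h1 : PySem.List.pyGet? (a :: b :: t).reverse (-1) = some a := by
      rw [PySem.List.pyGet?_neg_one, List.getLast?_reverse]; rfl
    have h2 : PySem.List.pyGet? (a :: b :: t).reverse (-2) = some b := by
      rw [show ((-2 : Int)) = -((2 : Nat) : Int) by norm_num,
          PySem.List.pyGet?_neg_natCast _ 2 (by omega) (by simp)]
      rw [List.getElem?_reverse (by simp)]
      have he : (a :: b :: t).length - 1 - ((a :: b :: t).reverse.length - 2) = 1 := by simp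
      rw [he]; rfl
    rw [h1, h2]
    by_cases ha : a = '1' <;> by_cases hb : b = '1' <;>
      simp [ha, hb]

-- a stack with at least two trailing '1's ends in ['1','1']
theorem pvTrail2_ends (st : List Char) (h : 2 ≤ pvTrail st) :
    ∃ u : List Char, st = u ++ ['1', '1'] := by
  obtain ⟨r, rfl⟩ : ∃ r : List Char, st = r.reverse := ⟨st.reverse, (List.reverse_reverse st).symm⟩
  have htr : pvTrail r.reverse = (r.takeWhile (· == '1')).length := by simp [pvTrail]
  rw [htr] at h
  rcases r with _ | ⟨a, _ | ⟨b, t⟩⟩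
  · simp at h
  · have hle := (List.takeWhile_prefix (l := [a]) (· == '1')).length_le
    simp at hle; omega
  · by_cases ha : a = '1' <;> by_cases hb : b = '1' <;>
      simp [ha, hb] at h
    exact ⟨t.reverse, by simp [ha, hb]⟩

theorem pvGet_m1 (l : List Char) (a : Char) :
    PySem.List.pyGet? (l ++ [a]) (-1) = some a := by
  rw [PySem.List.pyGet?_neg_one]
  simp

theorem pvGet_m2 (l : List Char) (a b : Char) :
    PySem.List.pyGet? (l ++ [a, b]) (-2) = some a := by
  rw [show ((-2 : Int)) = -((2 : Nat) : Int) by norm_num,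
      PySem.List.pyGet?_neg_natCast _ 2 (by omega) (by simp)]
  have he : (l ++ [a, b]).length - 2 = l.length := by simp
  rw [he, List.getElem?_append_right le_rfl]
  simp

-- folding A over a literal '1','1','0' block just bumps the counter
theorem pvStack_del (t : List Char) (st : List Char) (c : Nat) :
    List.foldl pvAStep (st, c) ('1' :: '1' :: '0' :: t) = List.foldl pvAStep (st, c + 1) t := by
  simp only [List.foldl_cons]
  have h1 : pvAStep (st, c) '1' = (st ++ ['1'], c) := by simp [pvAStep]
  have h2 : pvAStep (st ++ ['1'], c) '1' = (st ++ ['1', '1'], c) := by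
    simp [pvAStep]
  have hcond : 2 ≤ (st ++ ['1', '1']).length ∧
      PySem.List.pyGet? (st ++ ['1', '1']) (-2) = some '1' ∧
      PySem.List.pyGet? (st ++ ['1', '1']) (-1) = some '1' := by
    refine ⟨by simp, pvGet_m2 st '1' '1', ?_⟩
    rw [show st ++ ['1', '1'] = (st ++ ['1']) ++ ['1'] by simp]
    exact pvGet_m1 _ _
  have h3 : pvAStep (st ++ ['1', '1'], c) '0' = (st, c + 1) := by
    simp only [pvAStep, if_pos hcond, if_true]
    rw [show st ++ ['1', '1'] = (st ++ ['1']) ++ ['1'] by simp]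
    simp
  rw [h1, h2, h3]

-- one replace pass does not change the final stack (for any counter seeds)
theorem pvStack_rep1 : ∀ (n : Nat) (l : List Char), l.length ≤ n →
    ∀ (st : List Char) (c c' : Nat),
      (List.foldl pvAStep (st, c) l).1 = (List.foldl pvAStep (st, c') (pvRep1 l)).1 := by
  intro n
  induction n with
  | zero =>
      intro l h st c c'
      have hl : l = [] := List.eq_nil_of_length_eq_zero (Nat.le_zero.mp h)
      subst hl; simp [pvRep1]
  | succ n ih =>
      intro l h st c c'
      cases l with
      | nil => simp [pvRep1]
      | cons c0 t =>
          by_cases hp : ['1', '1', '0'].isPrefixOf (c0 :: t) = true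
          · obtain ⟨v, hv⟩ := List.isPrefixOf_iff_prefix.mp hp
            have hc0 : c0 = '1' ∧ t = '1' :: '0' :: v := by
              cases hv; exact ⟨rfl, rfl⟩
            obtain ⟨rfl, rfl⟩ := hc0
            rw [pvRep1, if_pos hp]
            have hdrop : (('1' : Char) :: '0' :: v).drop 2 = v := rfl
            rw [hdrop, pvStack_del v st c]
            exact ih v (by simp only [List.length_cons] at h; omega) st (c + 1) c'
          · rw [pvRep1, if_neg hp]
            simp only [List.foldl_cons]
            have hfst := pvAStep_fst st c c' c0
            rw [show pvAStep (st, c) c0 = ((pvAStep (st, c) c0).1, (pvAStep (st, c) c0).2) from rfl,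
                show pvAStep (st, c') c0 = ((pvAStep (st, c') c0).1, (pvAStep (st, c') c0).2) from rfl,
                ← hfst]
            exact ih t (by simp only [List.length_cons] at h; omega) _ _ _

-- length invariant: stack length + 3 * counter is conserved
theorem pvLenInv : ∀ (l : List Char) (st : List Char) (c : Nat),
    (List.foldl pvAStep (st, c) l).1.length + 3 * (List.foldl pvAStep (st, c) l).2
      = st.length + l.length + 3 * c := by
  intro l
  induction l with
  | nil => intro st c; simp
  | cons c0 t ih =>
      intro st c
      simp only [List.foldl_cons]
      by_cases hc : c0 = '0'
      · by_cases hcond : 2 ≤ st.length ∧ PySem.List.pyGet? st (-2) = some '1' ∧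
            PySem.List.pyGet? st (-1) = some '1'
        · have hstep : pvAStep (st, c) c0 = (st.dropLast.dropLast, c + 1) := by
            simp [pvAStep, hc, hcond]
          rw [hstep, ih]
          have h2 := hcond.1
          simp only [List.length_dropLast, List.length_cons]; omega
        · have hstep : pvAStep (st, c) c0 = (st ++ [c0], c) := by
            simp [pvAStep, hc, hcond]
          rw [hstep, ih]; simp only [List.length_append, List.length_cons, List.length_nil]; omega
      · have hstep : pvAStep (st, c) c0 = (st ++ [c0], c) := by simp [pvAStep, hc]
        rw [hstep, ih]; simp only [List.length_append, List.length_cons, List.length_nil]; omega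

-- on a '110'-free tail the fold only pushes
theorem pvNoInfix : ∀ (l : List Char) (st : List Char) (c : Nat),
    ¬ (['1', '1', '0'] <:+: (st ++ l)) →
    List.foldl pvAStep (st, c) l = (st ++ l, c) := by
  intro l
  induction l with
  | nil => intro st c _; simp
  | cons c0 t ih =>
      intro st c h
      simp only [List.foldl_cons]
      have hstep : pvAStep (st, c) c0 = (st ++ [c0], c) := by
        by_cases hc : c0 = '0'
        · by_cases hcond : 2 ≤ st.length ∧ PySem.List.pyGet? st (-2) = some '1' ∧
              PySem.List.pyGet? st (-1) = some '1'
          · exfalso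
            obtain ⟨u, rfl⟩ := pvTrail2_ends st ((pvCondA_iff st).mp hcond)
            exact h ⟨u, t, by simp [hc]⟩
          · simp [pvAStep, hc, hcond]
        · simp [pvAStep, hc]
      rw [hstep, ih (st ++ [c0]) c (by simpa using h)]
      simp

-- A's final stack is exactly B's replace-loop fixed point
theorem pvStack_rem : ∀ (n : Nat) (l : List Char), l.length ≤ n →
    (List.foldl pvAStep ([], 0) l).1 = pvRemLoop l := by
  intro n
  induction n with
  | zero =>
      intro l h
      have hl : l = [] := List.eq_nil_of_length_eq_zero (Nat.le_zero.mp h)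
      subst hl; rw [pvRemLoop]; simp [PySem.Chars.isIn_eq_false_iff]
  | succ n ih =>
      intro l h
      rw [pvRemLoop]
      by_cases hin : PySem.Chars.isIn ['1', '1', '0'] l = true
      · rw [if_pos hin, pvReplace_eq]
        have hinf := (PySem.Chars.isIn_iff_infix _ _).mp hin
        have hlt := pvRep1_len_infix l hinf
        rw [pvStack_rep1 l.length l le_rfl [] 0 0]
        exact ih (pvRep1 l) (by omega)
      · rw [if_neg hin]
        have hninf : ¬ (['1', '1', '0'] <:+: l) := (PySem.Chars.isIn_eq_false_iff _ _).mp
          (by simpa using hin)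
        rw [pvNoInfix l [] 0 (by simpa using hninf)]
        simp

-- ---- characterisation of find / rfind on the single character '0' ----

theorem pvTW_get (r : List Char) (h : '0' ∈ r) :
    r[(r.takeWhile (fun c => !(c == '0'))).length]? = some '0' := by
  induction r with
  | nil => simp at h
  | cons a t ih =>
    by_cases ha : a = '0'
    · simp [ha]
    · have ht : '0' ∈ t := by
        rcases List.mem_cons.mp h with h' | h'
        · exact absurd h'.symm ha
        · exact h'
      simp [ha, ih ht]

theorem pvTW_lt (r : List Char) :
    ∀ i, i < (r.takeWhile (fun c => !(c == '0'))).length → r[i]? ≠ some '0' := by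
  induction r with
  | nil => intro i hi; simp at hi
  | cons a t ih =>
    intro i hi
    by_cases ha : a = '0'
    · simp [ha] at hi
    · cases i with
      | zero => simp [ha]
      | succ i =>
        simp [ha] at hi
        simpa using ih i hi

theorem pvSingPrefix (a : Char) (l : List Char) : [a] <+: l ↔ l.head? = some a := by
  cases l with
  | nil => simp
  | cons b t =>
    constructor
    · rintro ⟨s, hs⟩
      simp at hs
      simp [hs.1]
    · intro h
      simp at h
      exact ⟨t, by simp [h]⟩

theorem pvSingInfix (l : List Char) : ['0'] <:+: l ↔ '0' ∈ l := by
  constructor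
  · intro h; exact h.subset (by simp)
  · intro h
    obtain ⟨s, t, rfl⟩ := List.append_of_mem h
    exact ⟨s, t, by simp⟩

theorem pvFind_single (r : List Char) :
    PySem.Chars.find r ['0']
      = if '0' ∈ r then (((r.takeWhile (fun c => !(c == '0'))).length : Nat) : Int) else -1 := by
  by_cases h0 : '0' ∈ r
  · have hpos : 0 ≤ PySem.Chars.find r ['0'] :=
      (PySem.Chars.find_nonneg_iff r ['0']).mpr ((pvSingInfix r).mpr h0)
    obtain ⟨hpre, hmin⟩ := PySem.Chars.find_spec hpos
    have hm0 : r[(PySem.Chars.find r ['0']).toNat]? = some '0' := by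
      rw [← List.head?_drop]
      exact (pvSingPrefix '0' _).mp hpre
    have hlt : ∀ i < (PySem.Chars.find r ['0']).toNat, r[i]? ≠ some '0' := by
      intro i hi hc
      exact hmin i hi ((pvSingPrefix '0' _).mpr (by rw [List.head?_drop]; exact hc))
    have hkm : (r.takeWhile (fun c => !(c == '0'))).length = (PySem.Chars.find r ['0']).toNat := by
      rcases lt_trichotomy (r.takeWhile (fun c => !(c == '0'))).length
          (PySem.Chars.find r ['0']).toNat with h | h | h
      · exact absurd (pvTW_get r h0) (hlt _ h)
      · exact h
      · exact absurd hm0 (pvTW_lt r _ h)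
    rw [if_pos h0, hkm]
    exact (Int.toNat_of_nonneg hpos).symm
  · rw [if_neg h0]
    exact (PySem.Chars.find_eq_neg_one_iff r ['0']).mpr fun hinf => h0 ((pvSingInfix r).mp hinf)

-- rfind('0') + 1 is the position just after the last '0' (0 if there is none)
theorem pvRFind0 (l : List Char) :
    PySem.Chars.rfind l ['0'] + 1
      = (((l.length - (l.reverse.takeWhile (fun c => !(c == '0'))).length : Nat)) : Int) := by
  set k := (l.reverse.takeWhile (fun c => !(c == '0'))).length with hk
  have hkle : k ≤ l.length := by
    have := (List.takeWhile_prefix (l := l.reverse) (fun c => !(c == '0'))).length_le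
    simpa using this
  set i := l.length - k with hi
  have f1 : ∀ m : Nat, i ≤ m → l[m]? ≠ some '0' := by
    intro m hm
    by_cases hmL : m < l.length
    · have hp : l.length - 1 - m < k := by omega
      have := pvTW_lt l.reverse (l.length - 1 - m) (by simpa using hp)
      rw [List.getElem?_reverse (by omega)] at this
      have he : l.length - 1 - (l.length - 1 - m) = m := by omega
      rw [he] at this
      exact this
    · rw [List.getElem?_eq_none_iff.mpr (by omega)]
      simp
  have f2 : 0 < i → l[i - 1]? = some '0' := by
    intro hipos
    have hkL : k < l.length := by omega
    have h0r : '0' ∈ l.reverse := by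
      by_contra h0
      have hall : l.reverse.takeWhile (fun c => !(c == '0')) = l.reverse :=
        List.takeWhile_eq_self_iff.mpr (fun x hx => by
          simp; intro hx0; exact h0 (hx0 ▸ hx))
      have := congrArg List.length hall
      simp only [List.length_reverse] at this
      omega
    have := pvTW_get l.reverse h0r
    rw [← hk, List.getElem?_reverse (by omega)] at this
    have he : l.length - 1 - k = i - 1 := by omega
    rw [he] at this
    exact this
  have hgo : ∀ j : Nat, i ≤ j + 1 → PySem.Chars.rfind.go l ['0'] j = (i : Int) - 1 := by
    intro j
    induction j with
    | zero =>
        intro hij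
        rw [PySem.Chars.rfind.go]
        interval_cases i
        · rw [if_neg]
          · norm_num
          · intro hp
            exact f1 0 le_rfl ((List.head?_drop (l := l) (i := 0)) ▸
              ((pvSingPrefix '0' l).mp (List.isPrefixOf_iff_prefix.mp hp) : l.head? = some '0') ▸ rfl)
        · rw [if_pos]
          · norm_num
          · exact List.isPrefixOf_iff_prefix.mpr ((pvSingPrefix '0' l).mpr
              (by rw [List.head?_eq_getElem?]; exact f2 (by omega)))
    | succ j ih =>
        intro hij
        rw [PySem.Chars.rfind.go]
        by_cases hcase : i = j + 2
        · rw [if_pos]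
          · omega
          · refine List.isPrefixOf_iff_prefix.mpr ((pvSingPrefix '0' _).mpr ?_)
            rw [List.head?_drop]
            have := f2 (by omega)
            rwa [show i - 1 = j + 1 by omega] at this
        · have hij' : i ≤ j + 1 := by omega
          rw [if_neg]
          · exact ih hij'
          · intro hp
            have := (pvSingPrefix '0' _).mp (List.isPrefixOf_iff_prefix.mp hp)
            rw [List.head?_drop] at this
            exact f1 (j + 1) hij' this
  have hmain : PySem.Chars.rfind l ['0'] = (i : Int) - 1 := by
    unfold PySem.Chars.rfind
    exact hgo l.length (by omega)
  rw [hmain]; ring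

theorem pvRep (c : Nat) :
    (List.flatten (List.replicate c ['0', '1', '1'])).reverse
      = List.flatten (List.replicate c ['1', '1', '0']) := by
  induction c with
  | zero => simp
  | succ n ih =>
    rw [List.replicate_succ, List.replicate_succ']
    simp [ih, List.flatten_append]

-- A's reverse / find-first-'0' / reverse-back reinsertion equals direct slicing at the
-- position just after the last '0'
theorem pvReins (st : List Char) (cnt : Nat) :
    ((if PySem.Chars.find st.reverse ['0'] ≠ -1 then
        PySem.List.slice st.reverse none (some (PySem.Chars.find st.reverse ['0']))
          ++ List.flatten (List.replicate cnt ['0', '1', '1'])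
          ++ PySem.List.slice st.reverse (some (PySem.Chars.find st.reverse ['0'])) none
      else st.reverse ++ List.flatten (List.replicate cnt ['0', '1', '1']))).reverse
    = PySem.List.slice st none
        (some (((st.length - (st.reverse.takeWhile (fun c => !(c == '0'))).length : Nat) : Int)))
        ++ List.flatten (List.replicate cnt ['1', '1', '0'])
        ++ PySem.List.slice st
            (some (((st.length - (st.reverse.takeWhile (fun c => !(c == '0'))).length : Nat) : Int)))
            none := by
  obtain ⟨r, rfl⟩ : ∃ r : List Char, st = r.reverse := ⟨st.reverse, (List.reverse_reverse st).symm⟩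
  rw [List.reverse_reverse]
  have hk_le : (r.takeWhile (fun c => !(c == '0'))).length ≤ r.length :=
    (List.takeWhile_prefix _).length_le
  have hlen : (r.reverse.length - (r.takeWhile (fun c => !(c == '0'))).length : Nat)
      = r.length - (r.takeWhile (fun c => !(c == '0'))).length := by simp
  rw [hlen, pvFind_single]
  by_cases h0 : '0' ∈ r
  · rw [if_pos h0]
    have hne : (((r.takeWhile (fun c => !(c == '0'))).length : Nat) : Int) ≠ -1 := by omega
    rw [if_pos hne]
    rw [PySem.List.slice_to_natCast, PySem.List.slice_from_natCast,
        PySem.List.slice_to_natCast, PySem.List.slice_from_natCast]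
    rw [List.take_reverse, List.drop_reverse]
    have he : r.length - (r.length - (r.takeWhile (fun c => !(c == '0'))).length)
        = (r.takeWhile (fun c => !(c == '0'))).length := by omega
    rw [he]
    simp [pvRep]
  · rw [if_neg h0]
    have hall : r.takeWhile (fun c => !(c == '0')) = r :=
      List.takeWhile_eq_self_iff.mpr (fun x hx => by
        simp; intro hx0; exact h0 (hx0 ▸ hx))
    rw [hall]
    rw [if_neg (by simp)]
    rw [PySem.List.slice_to_natCast, PySem.List.slice_from_natCast]
    simp [List.reverse_append, pvRep]

-- the two per-string bodies agree
theorem pvOne_eq (num : String) : pvAOne num = pvBOne num := by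
  have hst : (num.toList.foldl pvAStep ([], 0)).1 = pvRemLoop num.toList :=
    (pvStack_rem num.toList.length num.toList le_rfl)
  have hlen := pvLenInv num.toList [] 0
  simp only [List.length_nil, Nat.zero_add, Nat.mul_zero, Nat.add_zero] at hlen
  have hcnt : PySem.Int.floordiv
      ((num.toList.length : Int) - ((pvRemLoop num.toList).length : Int)) 3
      = ((num.toList.foldl pvAStep ([], 0)).2 : Int) := by
    rw [← hst]
    have hdiff : (num.toList.length : Int) - ((num.toList.foldl pvAStep ([], 0)).1.length : Int)
        = 3 * ((num.toList.foldl pvAStep ([], 0)).2 : Int) := by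
      omega
    rw [hdiff]
    unfold PySem.Int.floordiv
    exact Int.mul_fdiv_cancel_left _ (by norm_num)
  unfold pvAOne pvBOne
  dsimp only
  rw [hcnt, Int.toNat_natCast, ← hst, pvRFind0]
  exact congrArg String.ofList
    (pvReins (num.toList.foldl pvAStep ([], 0)).1 (num.toList.foldl pvAStep ([], 0)).2)

theorem pvFold_one (s : List String) (acc : List String) :
    s.foldl (fun answer num => answer ++ [pvAOne num]) acc
      = s.foldl (fun answer num => answer ++ [pvBOne num]) acc := by
  induction s generalizing acc with
  | nil => rfl
  | cons x t ih => simp only [List.foldl_cons]; rw [pvOne_eq, ih]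

-- ===== VERDICT (by name: the statement is the Claim_ definition above) =====
theorem move_110_spec : Claim_equal_move_110 := by
  intro s _
  show move_110 s = move_110_alt s
  simpa [move_110, move_110_alt] using pvFold_one s []
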